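-- pv_equiv track=rewrite | github.com/AlexSpy69/semicolon-newline | src/semicolon_newline/base.py | semicolon_newline
-- ===== SOURCE A (Python) =====
-- def semicolon_newline(string: str, spaces: int) -> str:
--     string = string.replace(' '*spaces, '\t') if spaces != -1 else string
--     new_string = ''
--     in_bracket = False
--     indentation = 0
--     prev_char = ''
--     for char in string:
--         match char:
--             case '(':
--                 in_bracket = True
--                 new_string += char
--             case ')':
--                 in_bracket = False
--                 new_string += char
--             case ';':
--                 new_string += ';' if in_bracket else '\n' + \
--                                                      (indentation + 1) * '\t' + ';'
--             case '\t':
--                 if prev_char != '\t':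
--                     indentation = 0
--                 indentation += 1
--                 new_string += char
--             case _:
--                 new_string += char
--         prev_char = char
--
--     return new_string.replace('\t', ' '*spaces) \
--         if spaces != -1 else new_string
-- ===== SOURCE B (Python) =====
-- def semicolon_newline(string: str, spaces: int) -> str:
--     text = string.replace(' ' * spaces, '\t') if spaces != -1 else string
--     segments = text.split(';')
--
--     def absorb(seg, in_bracket, indent):
--         # last '(' or ')' in the segment decides the bracket state
--         k = len(seg) - 1
--         while k >= 0 and seg[k] != '(' and seg[k] != ')':
--             k -= 1
--         if k >= 0:
--             in_bracket = seg[k] == '('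
--         # length of the last tab run in the segment decides the indent
--         j = len(seg) - 1
--         while j >= 0 and seg[j] != '\t':
--             j -= 1
--         if j >= 0:
--             k2 = j
--             while k2 >= 0 and seg[k2] == '\t':
--                 k2 -= 1
--             indent = j - k2
--         return in_bracket, indent
--
--     in_bracket, indent = absorb(segments[0], False, 0)
--     out = segments[0]
--     for seg in segments[1:]:
--         out += ';' if in_bracket else '\n' + '\t' * (indent + 1) + ';'
--         in_bracket, indent = absorb(seg, in_bracket, indent)
--         out += seg
--     return out.replace('\t', ' ' * spaces) if spaces != -1 else out
-- ===== Notes on version B (the rewrite author's own statement) =====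
-- stated objective: alternative
-- what changed: A's single per-character state machine is replaced by splitting the text on ';' and rejoining the segments, recovering the bracket state and the last tab-run length per segment with backward scans.
import Mathlib
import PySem

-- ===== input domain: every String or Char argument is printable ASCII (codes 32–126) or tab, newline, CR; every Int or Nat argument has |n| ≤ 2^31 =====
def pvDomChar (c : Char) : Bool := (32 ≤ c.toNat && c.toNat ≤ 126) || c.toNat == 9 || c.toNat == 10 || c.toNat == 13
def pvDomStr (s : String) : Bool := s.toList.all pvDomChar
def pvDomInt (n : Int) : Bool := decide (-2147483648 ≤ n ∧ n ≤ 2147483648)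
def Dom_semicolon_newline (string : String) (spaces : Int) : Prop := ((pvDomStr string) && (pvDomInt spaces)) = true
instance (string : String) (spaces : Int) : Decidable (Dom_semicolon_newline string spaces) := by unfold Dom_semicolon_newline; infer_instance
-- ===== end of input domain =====

-- B replaces A's per-character state machine by a split-on-';' decomposition:
-- segments are rejoined while bracket/indent state is recovered per segment by
-- backward scans (objective: alternative decomposition, same cost).


-- ===== PORT A =====
-- one iteration of A's for-loop; state = (new_string, in_bracket, indentation, prev_char)
-- (prev_char = none models Python's initial '' )
def pvStepA (st : List Char × Bool × Int × Option Char) (char : Char) : List Char × Bool × Int × Option Char :=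
  let ns := st.1; let inb := st.2.1; let ind := st.2.2.1; let prev := st.2.2.2
  let t :=
    if char = '(' then (ns ++ [char], true, ind)
    else if char = ')' then (ns ++ [char], false, ind)
    else if char = ';' then
      ((if inb then ns ++ [';'] else ns ++ '\n' :: (PySem.List.pyRepeat ['\t'] (ind + 1) ++ [';'])), inb, ind)
    else if char = '\t' then
      let ind0 := if prev ≠ some '\t' then 0 else ind
      (ns ++ [char], inb, ind0 + 1)
    else (ns ++ [char], inb, ind)
  (t.1, t.2.1, t.2.2, some char)

def pvCoreA (cs : List Char) : List Char :=
  (cs.foldl pvStepA ([], false, 0, none)).1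

def semicolon_newline (string : String) (spaces : Int) : String :=
  let s := if spaces ≠ -1 then PySem.Str.replace string (String.ofList (PySem.List.pyRepeat [' '] spaces)) "\t" else string
  let res := String.ofList (pvCoreA s.toList)
  if spaces ≠ -1 then PySem.Str.replace res "\t" (String.ofList (PySem.List.pyRepeat [' '] spaces)) else res

-- ===== PORT B =====
-- 'while k >= 0 and seg[k] satisfies p: k -= 1' (p = continue condition)
def pvScanBack (p : Char → Bool) (seg : List Char) (k : Int) : Int :=
  if _h : 0 ≤ k then
    match PySem.List.pyGet? seg k with
    | some c => if p c then pvScanBack p seg (k - 1) else k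
    | none => k          -- unreachable on B's calls (k < len seg); totality guard
  else k
termination_by (k + 1).toNat
decreasing_by omega

def pvAbsorb (seg : List Char) (inb : Bool) (ind : Int) : Bool × Int :=
  -- last '(' or ')' in the segment decides the bracket state
  let k := pvScanBack (fun c => !(c == '(') && !(c == ')')) seg (seg.length - 1)
  let inb' := if 0 ≤ k then ((PySem.List.pyGet? seg k).getD ' ') == '(' else inb
  -- length of the last tab run in the segment decides the indent
  let j := pvScanBack (fun c => !(c == '\t')) seg (seg.length - 1)
  let ind' := if 0 ≤ j then j - pvScanBack (fun c => c == '\t') seg j else ind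
  (inb', ind')

def pvLoopB (inb : Bool) (ind : Int) (segs : List (List Char)) (out : List Char) : List Char :=
  match segs with
  | [] => out
  | seg :: rest =>
    let sep := if inb then [';'] else '\n' :: (PySem.List.pyRepeat ['\t'] (ind + 1) ++ [';'])
    let s := pvAbsorb seg inb ind
    pvLoopB s.1 s.2 rest (out ++ sep ++ seg)

def pvCoreB (cs : List Char) : List Char :=
  match PySem.Chars.splitOn cs [';'] with
  | [] => []            -- unreachable: split(';') always yields ≥ 1 segment
  | s0 :: rest =>
    let s := pvAbsorb s0 false 0
    pvLoopB s.1 s.2 rest s0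

def semicolon_newline_alt (string : String) (spaces : Int) : String :=
  let s := if spaces ≠ -1 then PySem.Str.replace string (String.ofList (PySem.List.pyRepeat [' '] spaces)) "\t" else string
  let res := String.ofList (pvCoreB s.toList)
  if spaces ≠ -1 then PySem.Str.replace res "\t" (String.ofList (PySem.List.pyRepeat [' '] spaces)) else res

-- ===== PRECONDITION & SPEC =====
def Spec_semicolon_newline (string : String) (spaces : Int) (out : String) : Prop := out = semicolon_newline_alt string spaces
instance (string : String) (spaces : Int) (out : String) : Decidable (Spec_semicolon_newline string spaces out) := by unfold Spec_semicolon_newline; infer_instance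

-- ===== CLAIM (what is proved, stated in full; the proofs are below) =====
def Claim_equal_semicolon_newline : Prop := ∀ (string : String) (spaces : Int), Dom_semicolon_newline string spaces → Spec_semicolon_newline string spaces (semicolon_newline string spaces)

-- ===== LEMMAS AND PROOFS =====

-- specification values of the two state components after absorbing one ';'-free segment
def pvSpecB (b : Bool) (seg : List Char) : Bool :=
  match seg.reverse.dropWhile (fun c => !(c == '(') && !(c == ')')) with
  | [] => b
  | c :: _ => c == '('

def pvSpecI (i : Int) (seg : List Char) : Int :=
  match seg.reverse.dropWhile (fun c => !(c == '\t')) with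
  | [] => i
  | r => ((r.takeWhile (fun c => c == '\t')).length : Int)

def pvLastOr (p : Option Char) (seg : List Char) : Option Char :=
  match seg.getLast? with
  | some c => some c
  | none => p

theorem pvDropWhile_drop {p : Char → Bool} (l : List Char) :
    l.dropWhile p = l.drop (l.takeWhile p).length := by
  induction l with
  | nil => simp
  | cons a l ih =>
    rw [List.takeWhile_cons, List.dropWhile_cons]
    cases hpa : p a <;> simp [ih]

-- a backward scan from the end of the prefix xs never looks at ys
theorem pvScanBack_prefix (p : Char → Bool) (xs : List Char) : ∀ (ys : List Char),
    pvScanBack p (xs ++ ys) ((xs.length : Int) - 1) =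
      (xs.length : Int) - 1 - ((xs.reverse.takeWhile p).length : Int) := by
  induction xs using List.reverseRecOn with
  | nil => intro ys; rw [pvScanBack]; simp
  | append_singleton xs a ih =>
    intro ys
    have hx : (xs ++ [a]) ++ ys = xs ++ (a :: ys) := by simp
    have hlen : (((xs ++ [a]).length : Int)) - 1 = (xs.length : Int) := by
      simp
    rw [pvScanBack, hlen]
    rw [dif_pos (by positivity)]
    have hget : PySem.List.pyGet? (xs ++ [a] ++ ys) ((xs.length : Int)) = some a := by
      rw [PySem.List.pyGet?_natCast, hx]
      rw [List.getElem?_append_right (by omega)]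
      simp
    rw [hget]
    cases hpa : p a with
    | false =>
      simp [hpa]
    | true =>
      simp only [hpa, if_true]
      rw [hx, show (xs.length : Int) - 1 = ((xs.length : Int)) - 1 from rfl, ih (a :: ys)]
      simp [hpa]
      omega

-- B's absorb: first component
theorem pvAbsorb_fst (seg : List Char) (b : Bool) (i : Int) :
    (pvAbsorb seg b i).1 = pvSpecB b seg := by
  have hscan := pvScanBack_prefix (fun c => !(c == '(') && !(c == ')')) seg []
  rw [List.append_nil] at hscan
  simp only [pvAbsorb]
  rw [hscan]
  cases hdb : seg.reverse.dropWhile (fun c => !(c == '(') && !(c == ')')) with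
  | nil =>
    have hfull : (seg.reverse.takeWhile (fun c => !(c == '(') && !(c == ')'))).length
        = seg.length := by
      have := List.takeWhile_append_dropWhile
        (p := fun c => !(c == '(') && !(c == ')')) (l := seg.reverse)
      rw [hdb, List.append_nil] at this
      rw [this, List.length_reverse]
    rw [hfull, if_neg (by omega)]
    simp [pvSpecB, hdb]
  | cons c r' =>
    have ht : (seg.reverse.takeWhile (fun c => !(c == '(') && !(c == ')'))).length
        < seg.length := by
      have hlen := congrArg List.length
        (List.takeWhile_append_dropWhile
          (p := fun c => !(c == '(') && !(c == ')')) (l := seg.reverse))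
      rw [hdb] at hlen
      simp at hlen
      omega
    set t := (seg.reverse.takeWhile (fun c => !(c == '(') && !(c == ')'))).length with htdef
    rw [if_pos (by omega)]
    have hidx : (seg.length : Int) - 1 - (t : Int) = ((seg.length - 1 - t : Nat) : Int) := by
      omega
    rw [hidx, PySem.List.pyGet?_natCast]
    have hrev : seg.reverse[t]? = seg[seg.length - 1 - t]? :=
      List.getElem?_reverse (by omega)
    have hdropv : seg.reverse[t]? = some c := by
      have hd : seg.reverse.drop t = c :: r' := by
        rw [htdef, ← pvDropWhile_drop, hdb]
      have h0 : (seg.reverse.drop t)[0]? = seg.reverse[t + 0]? := List.getElem?_drop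
      rw [hd] at h0
      simpa using h0.symm
    rw [← hrev, hdropv]
    simp [pvSpecB, hdb]

-- B's absorb: second component
theorem pvAbsorb_snd (seg : List Char) (b : Bool) (i : Int) :
    (pvAbsorb seg b i).2 = pvSpecI i seg := by
  have hscan2 := pvScanBack_prefix (fun c => !(c == '\t')) seg []
  rw [List.append_nil] at hscan2
  simp only [pvAbsorb]
  rw [hscan2]
  cases hdb : seg.reverse.dropWhile (fun c => !(c == '\t')) with
  | nil =>
    have hfull : (seg.reverse.takeWhile (fun c => !(c == '\t'))).length = seg.length := by
      have := List.takeWhile_append_dropWhile (p := fun c => !(c == '\t')) (l := seg.reverse)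
      rw [hdb, List.append_nil] at this
      rw [this, List.length_reverse]
    rw [hfull, if_neg (by omega)]
    simp [pvSpecI, hdb]
  | cons c r' =>
    have ht : (seg.reverse.takeWhile (fun c => !(c == '\t'))).length < seg.length := by
      have hlen := congrArg List.length
        (List.takeWhile_append_dropWhile (p := fun c => !(c == '\t')) (l := seg.reverse))
      rw [hdb] at hlen
      simp at hlen
      omega
    set t := (seg.reverse.takeWhile (fun c => !(c == '\t'))).length with htdef
    rw [if_pos (by omega)]
    have hsplit : seg = seg.take (seg.length - t) ++ seg.drop (seg.length - t) := by
      rw [List.take_append_drop]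
    have hxlen : (seg.take (seg.length - t)).length = seg.length - t := by
      simp
    have hj : (seg.length : Int) - 1 - (t : Int)
        = ((seg.take (seg.length - t)).length : Int) - 1 := by
      rw [hxlen]; omega
    rw [hj]
    conv_lhs => rw [show pvScanBack (fun c => c == '\t') seg
        (((seg.take (seg.length - t)).length : Int) - 1)
      = pvScanBack (fun c => c == '\t')
          (seg.take (seg.length - t) ++ seg.drop (seg.length - t))
          (((seg.take (seg.length - t)).length : Int) - 1) from by rw [← hsplit]]
    rw [pvScanBack_prefix]
    have hxrev : (seg.take (seg.length - t)).reverse = c :: r' := by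
      rw [List.reverse_take, show seg.length - (seg.length - t) = t from by omega,
        ← pvDropWhile_drop, hdb]
    rw [hxrev, hxlen]
    simp [pvSpecI, hdb]

theorem pvAbsorb_eq (seg : List Char) (b : Bool) (i : Int) :
    pvAbsorb seg b i = (pvSpecB b seg, pvSpecI i seg) := by
  rw [← pvAbsorb_fst seg b i, ← pvAbsorb_snd seg b i]

-- A's fold over one ';'-free segment
theorem pvFoldA_seg (seg : List Char) (h : ';' ∉ seg) (acc : List Char) (b : Bool) (i : Int)
    (p : Option Char) (hp : p ≠ some '\t') :
    List.foldl pvStepA (acc, b, i, p) seg =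
      (acc ++ seg, pvSpecB b seg, pvSpecI i seg, pvLastOr p seg) := by
  induction seg using List.reverseRecOn with
  | nil => simp [pvSpecB, pvSpecI, pvLastOr]
  | append_singleton xs a ih =>
    have hxs : ';' ∉ xs := fun hm => h (List.mem_append_left _ hm)
    have ha : a ≠ ';' := fun he => h (by simp [he])
    rw [List.foldl_append, ih hxs]
    have hlast : pvLastOr p (xs ++ [a]) = some a := by
      simp [pvLastOr]
    by_cases h1 : a = '('
    · subst h1
      simp only [List.foldl_cons, List.foldl_nil, pvStepA]
      simp [pvSpecB, pvSpecI, pvLastOr]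
    · by_cases h2 : a = ')'
      · subst h2
        simp only [List.foldl_cons, List.foldl_nil, pvStepA]
        simp [pvSpecB, pvSpecI, pvLastOr]
      · by_cases h4 : a = '\t'
        · subst h4
          have hB : pvSpecB b (xs ++ ['\t']) = pvSpecB b xs := by
            simp [pvSpecB]
          have hI : pvSpecI i (xs ++ ['\t'])
              = (if pvLastOr p xs ≠ some '\t' then 0 else pvSpecI i xs) + 1 := by
            cases hxr : xs.reverse with
            | nil =>
              have hxnil : xs = [] := by
                have := congrArg List.reverse hxr
                simpa using this
              subst hxnil
              simp only [pvLastOr, List.getLast?_nil]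
              rw [if_pos (by simpa using hp)]
              simp [pvSpecI]
            | cons d rs =>
              have hlast' : pvLastOr p xs = some d := by
                simp [pvLastOr, List.getLast?_eq_head?_reverse, hxr]
              rw [hlast']
              by_cases hd : d = '\t'
              · subst hd
                rw [if_neg (by simp)]
                simp [pvSpecI, hxr]
              · rw [if_pos (by simp [hd])]
                simp [pvSpecI, hxr, hd]
          simp only [List.foldl_cons, List.foldl_nil, pvStepA]
          simp only [show ¬('\t' = '(') from by decide, show ¬('\t' = ')') from by decide,
            show ¬('\t' = ';') from by decide, reduceIte]
          rw [hB, hI, hlast]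
          simp
        · -- ordinary character
          have hB : pvSpecB b (xs ++ [a]) = pvSpecB b xs := by
            simp [pvSpecB, h1, h2]
          have hI : pvSpecI i (xs ++ [a]) = pvSpecI i xs := by
            simp [pvSpecI, h4]
          simp only [List.foldl_cons, List.foldl_nil, pvStepA]
          simp only [if_neg h1, if_neg h2, if_neg ha, if_neg h4]
          rw [hB, hI, hlast]
          simp

-- A's fold over the remaining ';'-prefixed segments is B's rebuild loop
theorem pvMain (rest : List (List Char)) : ∀ (b : Bool) (i : Int) (acc : List Char)
    (p : Option Char), (∀ s ∈ rest, ';' ∉ s) →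
    (List.foldl pvStepA (acc, b, i, p) (rest.flatMap (fun s => ';' :: s))).1
      = pvLoopB b i rest acc := by
  induction rest with
  | nil => intro b i acc p _; simp [pvLoopB]
  | cons seg rest' ih =>
    intro b i acc p hfree
    have hseg : ';' ∉ seg := hfree seg (by simp)
    have hrest : ∀ s ∈ rest', ';' ∉ s := fun s hs => hfree s (by simp [hs])
    rw [List.flatMap_cons]
    have hshape : (';' :: seg) ++ rest'.flatMap (fun s => ';' :: s)
        = ';' :: (seg ++ rest'.flatMap (fun s => ';' :: s)) := by simp
    rw [hshape, List.foldl_cons]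
    have hstep : pvStepA (acc, b, i, p) ';'
        = (acc ++ (if b then [';'] else '\n' :: (PySem.List.pyRepeat ['\t'] (i + 1) ++ [';'])),
            b, i, some ';') := by
      simp only [pvStepA]
      norm_num
      cases b <;> simp
    rw [hstep, List.foldl_append, pvFoldA_seg seg hseg _ b i (some ';') (by decide),
      ih _ _ _ _ hrest]
    rw [pvLoopB, pvAbsorb_eq]

-- PySem's splitOn agrees with List.splitOn for a one-character separator
theorem pvGo_eq (c : Char) : ∀ (fuel : Nat) (l cur : List Char) (acc : List (List Char)),
    l.length ≤ fuel →
    PySem.Chars.splitOn.go [c] fuel l cur acc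
      = acc.reverse ++ (l.splitOn c).modifyHead (cur.reverse ++ ·) := by
  intro fuel
  induction fuel with
  | zero =>
    intro l cur acc hl
    have hnil : l = [] := by
      cases l with
      | nil => rfl
      | cons a l => simp at hl
    subst hnil
    rw [PySem.Chars.splitOn.go.eq_def]
    simp [List.splitOn, List.splitOnP, List.splitOnP.go]
  | succ fuel ih =>
    intro l cur acc hl
    cases l with
    | nil =>
      rw [PySem.Chars.splitOn.go.eq_def]
      simp [List.splitOn, List.splitOnP, List.splitOnP.go]
    | cons c' rest =>
      rw [PySem.Chars.splitOn.go.eq_def]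
      have hpre : [c].isPrefixOf (c' :: rest) = (c == c') := by
        simp [List.isPrefixOf]
      simp only [hpre]
      by_cases hc : c = c'
      · subst hc
        rw [if_pos (by simp)]
        have hdrop : List.drop [c].length (c :: rest) = rest := by simp
        rw [hdrop, ih rest [] (cur.reverse :: acc) (by simpa using hl)]
        rw [show (c :: rest).splitOn c = [] :: rest.splitOn c from by
          simp [List.splitOn]]
        cases hre : rest.splitOn c <;> simp [List.modifyHead]
      · rw [if_neg (by simp [hc])]
        rw [ih rest (c' :: cur) acc (by simpa using hl)]
        rw [show (c' :: rest).splitOn c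
            = (rest.splitOn c).modifyHead (c' :: ·) from by
          simp [List.splitOn, List.splitOnP_cons, Ne.symm hc]]
        rw [List.modifyHead_modifyHead]
        cases hre : rest.splitOn c <;> simp [List.modifyHead]

theorem pvSplitOn_eq (cs : List Char) (c : Char) :
    PySem.Chars.splitOn cs [c] = cs.splitOn c := by
  unfold PySem.Chars.splitOn
  rw [pvGo_eq c (cs.length + 1) cs [] [] (by omega)]
  cases hre : cs.splitOn c <;> simp [List.modifyHead]

theorem pvSplitOn_parts (cs : List Char) : ∀ s ∈ cs.splitOn ';', ';' ∉ s := by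
  induction cs with
  | nil =>
    intro s hs
    rw [List.splitOn_nil] at hs
    simp at hs
    simp [hs]
  | cons c cs ih =>
    intro s hs
    by_cases hc : c = ';'
    · subst hc
      rw [show (';' :: cs).splitOn ';' = [] :: cs.splitOn ';' from by
        simp [List.splitOn]] at hs
      rcases List.mem_cons.mp hs with hs | hs
      · simp [hs]
      · exact ih s hs
    · rw [show (c :: cs).splitOn ';' = (cs.splitOn ';').modifyHead (c :: ·) from by
        simp [List.splitOn, List.splitOnP_cons, hc]] at hs
      obtain ⟨h0, t0, hsplit⟩ :=
        List.exists_cons_of_ne_nil (List.splitOnP_ne_nil (fun x => x == ';') cs)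
      rw [show cs.splitOn ';' = h0 :: t0 from hsplit] at hs
      simp [List.modifyHead] at hs
      rcases hs with hs | hs
      · subst hs
        intro hmem
        rcases List.mem_cons.mp hmem with hx | hx
        · exact hc hx.symm
        · exact ih h0 (by rw [show cs.splitOn ';' = h0 :: t0 from hsplit]; simp) hx
      · exact ih s (by rw [show cs.splitOn ';' = h0 :: t0 from hsplit]; simp [hs])

-- the segments of splitOn reassemble to the original list
theorem pvJoin (cs : List Char) : ∀ (s0 : List Char) (rest : List (List Char)),
    cs.splitOn ';' = s0 :: rest → cs = s0 ++ rest.flatMap (fun s => ';' :: s) := by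
  induction cs with
  | nil =>
    intro s0 rest hsp
    rw [List.splitOn_nil] at hsp
    cases hsp
    simp
  | cons c cs ih =>
    intro s0 rest hsp
    obtain ⟨h0, t0, hsplit⟩ :=
      List.exists_cons_of_ne_nil (List.splitOnP_ne_nil (fun x => x == ';') cs)
    have hsplit' : cs.splitOn ';' = h0 :: t0 := hsplit
    by_cases hc : c = ';'
    · subst hc
      rw [show (';' :: cs).splitOn ';' = [] :: cs.splitOn ';' from by
        simp [List.splitOn], hsplit'] at hsp
      cases hsp
      rw [List.flatMap_cons]
      have := ih h0 t0 hsplit'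
      simp [this]
    · rw [show (c :: cs).splitOn ';' = (cs.splitOn ';').modifyHead (c :: ·) from by
        simp [List.splitOn, List.splitOnP_cons, hc], hsplit'] at hsp
      simp [List.modifyHead] at hsp
      obtain ⟨hs0, hrest⟩ := hsp
      subst hs0; subst hrest
      have := ih h0 t0 hsplit'
      simp [this]

-- the two cores agree
theorem pvCore_eq (cs : List Char) : pvCoreA cs = pvCoreB cs := by
  unfold pvCoreA pvCoreB
  rw [pvSplitOn_eq]
  obtain ⟨s0, rest, hsr⟩ :=
    List.exists_cons_of_ne_nil (List.splitOnP_ne_nil (fun x => x == ';') cs)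
  have hsr' : cs.splitOn ';' = s0 :: rest := hsr
  have hcs : cs = s0 ++ rest.flatMap (fun s => ';' :: s) := pvJoin cs s0 rest hsr'
  have hparts := pvSplitOn_parts cs
  rw [hsr'] at hparts
  have hs0 : ';' ∉ s0 := hparts s0 (by simp)
  have hrest : ∀ s ∈ rest, ';' ∉ s := fun s hs => hparts s (by simp [hs])
  rw [hsr']
  conv_lhs => rw [hcs]
  rw [List.foldl_append, pvFoldA_seg s0 hs0 [] false 0 none (by decide)]
  rw [pvMain rest _ _ _ _ hrest]
  simp [pvAbsorb_eq]

-- ===== VERDICT (by name: the statement is the Claim_ definition above) =====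
theorem semicolon_newline_spec : Claim_equal_semicolon_newline := by
  intro string spaces _
  unfold Spec_semicolon_newline semicolon_newline semicolon_newline_alt
  simp only [pvCore_eq]
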